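-- pv_equiv track=rewrite | github.com/phuc-hyphen/Python_exercices | Graphe/tp1.py | is_simple1
-- ===== SOURCE A (Python) =====
-- def is_simple1(n, edges):
--     # checks = []
--     if n > 0:
--         for (x, y) in edges:
--             if x < 0 or x > n - 1 or y < 0 or y > n - 1:
--                 return False
--             # checks.append((x, y))
--             if (y, x) in edges:
--                 return False
--             if (x, x) in edges or (y, y) in edges:
--                 return False
--         return True
--     return False
-- ===== SOURCE B (Python) =====
-- def is_simple1(n, edges):
--     if n <= 0:
--         return False
--     if any(x < 0 or x >= n or y < 0 or y >= n for (x, y) in edges):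
--         return False
--     es = set(edges)
--     rev = {(y, x) for (x, y) in edges}
--     return not (es & rev)
-- ===== Notes on version B (the rewrite author's own statement) =====
-- stated objective: idiomatic
-- what changed: Replaced A's per-edge membership probes (reverse edge and two self-loop lookups scanned through the whole list for every edge) by one bounds pass plus a bulk set intersection of the edge set with its reversed set, which catches reverse pairs and self-loops at once.
import Mathlib
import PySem

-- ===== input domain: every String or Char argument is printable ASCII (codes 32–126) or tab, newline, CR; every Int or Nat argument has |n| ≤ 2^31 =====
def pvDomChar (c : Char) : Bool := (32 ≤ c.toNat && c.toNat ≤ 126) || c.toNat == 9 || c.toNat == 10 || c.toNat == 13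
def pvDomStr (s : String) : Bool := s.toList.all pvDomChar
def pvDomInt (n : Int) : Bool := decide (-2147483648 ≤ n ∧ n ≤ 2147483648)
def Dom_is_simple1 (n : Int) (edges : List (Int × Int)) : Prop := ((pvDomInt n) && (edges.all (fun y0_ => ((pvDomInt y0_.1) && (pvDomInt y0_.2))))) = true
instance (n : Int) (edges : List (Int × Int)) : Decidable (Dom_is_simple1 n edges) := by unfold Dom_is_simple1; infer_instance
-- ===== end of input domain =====

-- B replaces A's per-edge reverse/self-loop membership scans by one bounds pass plus a
-- bulk intersection of the edge set with its reversed set (idiomatic, and faster for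
-- Python's hash sets; the proof here is about the values only).

-- ===== PORT A =====
-- the for-loop of A, with `edges` the full list the `in` tests probe
def isSimpleLoopA (n : Int) (edges : List (Int × Int)) : List (Int × Int) → Bool
  | [] => true
  | (x, y) :: rest =>
    if x < 0 || x > n - 1 || y < 0 || y > n - 1 then false
    else if edges.contains (y, x) then false
    else if edges.contains (x, x) || edges.contains (y, y) then false
    else isSimpleLoopA n edges rest

def is_simple1 (n : Int) (edges : List (Int × Int)) : Bool :=
  if n > 0 then isSimpleLoopA n edges edges else false

-- ===== PORT B =====
def is_simple1_alt (n : Int) (edges : List (Int × Int)) : Bool :=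
  if n ≤ 0 then false
  else if edges.any (fun e => e.1 < 0 || e.1 ≥ n || e.2 < 0 || e.2 ≥ n) then false
  else
    let es : PySem.Set (Int × Int) := PySem.Set.ofList edges
    let rev : PySem.Set (Int × Int) := PySem.Set.ofList (edges.map (fun e => (e.2, e.1)))
    (PySem.Set.inter es rev).isEmpty

-- ===== PRECONDITION & SPEC =====
def Spec_is_simple1 (n : Int) (edges : List (Int × Int)) (out : Bool) : Prop := out = is_simple1_alt n edges
instance (n : Int) (edges : List (Int × Int)) (out : Bool) : Decidable (Spec_is_simple1 n edges out) := by unfold Spec_is_simple1; infer_instance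

-- ===== CLAIM (what is proved, stated in full; the proofs are below) =====
def Claim_equal_is_simple1 : Prop := ∀ (n : Int) (edges : List (Int × Int)), Dom_is_simple1 n edges → Spec_is_simple1 n edges (is_simple1 n edges)

-- ===== LEMMAS AND PROOFS =====

-- the per-edge boolean test A's loop applies
def edgeCheckA (n : Int) (edges : List (Int × Int)) (e : Int × Int) : Bool :=
  !(decide (e.1 < 0) || decide (e.1 > n - 1) || decide (e.2 < 0) || decide (e.2 > n - 1))
    && !edges.contains (e.2, e.1)
    && !(edges.contains (e.1, e.1) || edges.contains (e.2, e.2))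

theorem isSimpleLoopA_eq_all (n : Int) (edges : List (Int × Int)) :
    ∀ l : List (Int × Int), isSimpleLoopA n edges l = l.all (edgeCheckA n edges) := by
  intro l
  induction l with
  | nil => rfl
  | cons hd tl ih =>
    obtain ⟨x, y⟩ := hd
    simp only [isSimpleLoopA, List.all_cons, ih, edgeCheckA]
    cases h1 : (decide (x < 0) || decide (x > n - 1) || decide (y < 0) || decide (y > n - 1)) <;>
      cases h2 : edges.contains (y, x) <;>
        cases h3 : (edges.contains (x, x) || edges.contains (y, y)) <;>
          simp

theorem isSimpleLoopA_eq_true_iff (n : Int) (edges : List (Int × Int))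
    (l : List (Int × Int)) : isSimpleLoopA n edges l = true ↔
      ∀ e ∈ l, (0 ≤ e.1 ∧ e.1 ≤ n - 1 ∧ 0 ≤ e.2 ∧ e.2 ≤ n - 1) ∧
        (e.2, e.1) ∉ edges ∧ (e.1, e.1) ∉ edges ∧ (e.2, e.2) ∉ edges := by
  rw [isSimpleLoopA_eq_all, List.all_eq_true]
  have hcheck : ∀ e : Int × Int, edgeCheckA n edges e = true ↔
      (0 ≤ e.1 ∧ e.1 ≤ n - 1 ∧ 0 ≤ e.2 ∧ e.2 ≤ n - 1) ∧
        (e.2, e.1) ∉ edges ∧ (e.1, e.1) ∉ edges ∧ (e.2, e.2) ∉ edges := by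
    intro e
    have hc : ∀ p : Int × Int, (edges.contains p = false) ↔ p ∉ edges := by
      intro p
      rw [← List.contains_iff_mem (a := p) (as := edges)]
      simp
    simp only [edgeCheckA, Bool.and_eq_true, Bool.not_eq_true', Bool.or_eq_false_iff,
      decide_eq_false_iff_not, hc]
    constructor
    · rintro ⟨⟨⟨⟨⟨hb1, hb2⟩, hb3⟩, hb4⟩, hr⟩, hs1, hs2⟩
      exact ⟨⟨by omega, by omega, by omega, by omega⟩, hr, hs1, hs2⟩
    · rintro ⟨⟨hb1, hb2, hb3, hb4⟩, hr, hs1, hs2⟩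
      exact ⟨⟨⟨⟨⟨by omega, by omega⟩, by omega⟩, by omega⟩, hr⟩, hs1, hs2⟩
  constructor
  · intro h e he
    exact (hcheck e).mp (h e he)
  · intro h e he
    exact (hcheck e).mpr (h e he)

theorem is_simple1_spec : Claim_equal_is_simple1 := by
  intro n edges _
  unfold Spec_is_simple1 is_simple1 is_simple1_alt
  by_cases hn : n > 0
  · have hn' : ¬ n ≤ 0 := by omega
    simp only [if_pos hn, if_neg hn']
    by_cases hb : edges.any (fun e => e.1 < 0 || e.1 ≥ n || e.2 < 0 || e.2 ≥ n) = true
    · -- some edge out of bounds: both sides are false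
      simp only [if_pos hb]
      rcases List.any_eq_true.mp hb with ⟨e, he, hcond⟩
      rw [Bool.eq_false_iff]
      intro htrue
      have h := ((isSimpleLoopA_eq_true_iff n edges edges).mp htrue e he).1
      simp only [Bool.or_eq_true, decide_eq_true_eq] at hcond
      omega
    · simp only [if_neg hb]
      have hbnd : ∀ e ∈ edges, 0 ≤ e.1 ∧ e.1 ≤ n - 1 ∧ 0 ≤ e.2 ∧ e.2 ≤ n - 1 := by
        intro e he
        have h' : ¬(e.1 < 0 ∨ e.1 ≥ n ∨ e.2 < 0 ∨ e.2 ≥ n) := by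
          intro hc
          exact hb (List.any_eq_true.mpr ⟨e, he, by
            simp only [Bool.or_eq_true, decide_eq_true_eq]; tauto⟩)
        omega
      -- membership in the intersection ↔ a reverse pair
      have hrevmem : ∀ p : Int × Int, p ∈ PySem.Set.inter (PySem.Set.ofList edges)
          (PySem.Set.ofList (edges.map (fun e => (e.2, e.1)))) ↔
          p ∈ edges ∧ (p.2, p.1) ∈ edges := by
        intro p
        rw [PySem.Set.mem_inter, PySem.Set.mem_ofList, PySem.Set.mem_ofList, List.mem_map]
        constructor
        · rintro ⟨h1, ⟨q, hq, hqe⟩⟩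
          refine ⟨h1, ?_⟩
          obtain ⟨a, b⟩ := q
          cases hqe
          exact hq
        · rintro ⟨h1, h2⟩
          exact ⟨h1, ⟨(p.2, p.1), h2, rfl⟩⟩
      have hempty : (PySem.Set.inter (PySem.Set.ofList edges)
          (PySem.Set.ofList (edges.map (fun e => (e.2, e.1))))).isEmpty = true ↔
          ∀ e ∈ edges, (e.2, e.1) ∉ edges := by
        rw [List.isEmpty_iff]
        constructor
        · intro h e he hrev
          have hm : e ∈ PySem.Set.inter (PySem.Set.ofList edges)
              (PySem.Set.ofList (edges.map (fun e => (e.2, e.1)))) := (hrevmem e).mpr ⟨he, hrev⟩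
          rw [h] at hm
          exact absurd hm List.not_mem_nil
        · intro h
          rcases hx : PySem.Set.inter (PySem.Set.ofList edges)
              (PySem.Set.ofList (edges.map (fun e => (e.2, e.1)))) with _ | ⟨p, rest⟩
          · exact hx
          · have hp : p ∈ PySem.Set.inter (PySem.Set.ofList edges)
                (PySem.Set.ofList (edges.map (fun e => (e.2, e.1)))) := by
              rw [hx]; exact List.mem_cons_self
            have hpp := (hrevmem p).mp hp
            exact absurd hpp.2 (h p hpp.1)
      by_cases hrev : ∀ e ∈ edges, (e.2, e.1) ∉ edges
      · -- both true
        have hnoself : ∀ z : Int, (z, z) ∉ edges := fun z hz => hrev (z, z) hz hz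
        have hA : isSimpleLoopA n edges edges = true := by
          rw [isSimpleLoopA_eq_true_iff]
          intro e he
          exact ⟨hbnd e he, hrev e he, hnoself e.1, hnoself e.2⟩
        rw [hA, Eq.comm, hempty]
        exact hrev
      · -- both false
        push_neg at hrev
        rcases hrev with ⟨e, he, hrev⟩
        have hA : isSimpleLoopA n edges edges = false := by
          rw [Bool.eq_false_iff, Ne, isSimpleLoopA_eq_true_iff]
          intro h
          exact (h e he).2.1 hrev
        rw [hA, Eq.comm, Bool.eq_false_iff]
        intro hI
        exact (hempty.mp hI) e he hrev
  · have hn' : n ≤ 0 := by omega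
    simp [if_neg hn, if_pos hn']
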